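-- pv_equiv track=rewrite | github.com/grapheneaffiliate/h4-polytopic-attention | solve_arc_b24.py | solve_feca6190
-- ===== SOURCE A (Python) =====
-- def solve_feca6190(grid):
--     """1x5 -> NxN diagonal pattern. N = 5 * count(non-zero)."""
--     vals = grid[0]
--     non_zero = [(i,v) for i,v in enumerate(vals) if v != 0]
--     N = 5 * len(non_zero)
--
--     out = [[0]*N for _ in range(N)]
--     for pos, val in non_zero:
--         # Place on diagonal: at row r, col = N-1-r+pos
--         for r in range(N):
--             c = N - 1 - r + pos
--             if 0 <= c < N:
--                 out[r][c] = val
--     return out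
-- ===== SOURCE B (Python) =====
-- def solve_feca6190(grid):
--     """1x5 -> NxN diagonal pattern. N = 5 * count(non-zero)."""
--     idx = {i: v for i, v in enumerate(grid[0]) if v != 0}
--     N = 5 * len(idx)
--     return [[idx.get(r + c - (N - 1), 0) for c in range(N)] for r in range(N)]
-- ===== Notes on version B (the rewrite author's own statement) =====
-- stated objective: alternative
-- what changed: Instead of sweeping a diagonal per non-zero value into a mutable zero grid, B builds an index->value dict once and fills the grid in a single nested comprehension, computing each cell by looking up its anti-diagonal key r+c-(N-1).
import Mathlib
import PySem

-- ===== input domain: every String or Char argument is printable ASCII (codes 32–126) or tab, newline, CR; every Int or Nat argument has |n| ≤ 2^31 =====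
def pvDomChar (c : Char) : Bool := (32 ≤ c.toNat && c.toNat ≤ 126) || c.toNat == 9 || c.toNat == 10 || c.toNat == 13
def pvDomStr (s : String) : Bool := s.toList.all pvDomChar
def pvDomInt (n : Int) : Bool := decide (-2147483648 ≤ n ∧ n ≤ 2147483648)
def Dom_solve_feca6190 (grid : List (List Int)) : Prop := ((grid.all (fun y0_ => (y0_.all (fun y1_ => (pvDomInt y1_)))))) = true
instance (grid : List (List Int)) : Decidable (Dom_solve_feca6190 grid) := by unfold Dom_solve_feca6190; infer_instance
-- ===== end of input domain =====

-- B replaces A's per-value diagonal sweep into a mutable zero grid by a one-shot index→value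
-- dict and a per-cell lookup of the anti-diagonal key r+c-(N-1) (objective: alternative).

-- ===== PORT A =====
-- inner loop of A for one pair (pos, val): for r in range(N): c = N-1-r+pos; if 0 <= c < N: out[r][c] = val
-- (indices r and c are guarded to be in range, so pySetD/pyGetD are exact here)
def pvPlaceA (N pos val : Int) (out : List (List Int)) : List (List Int) :=
  (PySem.List.pyRange 0 N 1).foldl (fun o r =>
    let c := N - 1 - r + pos
    if 0 ≤ c ∧ c < N then
      PySem.List.pySetD o r (PySem.List.pySetD (PySem.List.pyGetD o r []) c val)
    else o) out

def solve_feca6190 (grid : List (List Int)) : List (List Int) :=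
  let vals := (PySem.List.pyGet? grid 0).getD []  -- grid[0]; Pre_ excludes grid = [] (IndexError)
  let nonZero := (PySem.List.enumerate vals).filter (fun p => p.2 != 0)
  let N : Int := 5 * PySem.List.len nonZero
  let out := List.replicate N.toNat (List.replicate N.toNat (0 : Int))
  nonZero.foldl (fun o p => pvPlaceA N p.1 p.2 o) out

-- ===== PORT B =====
def solve_feca6190_alt (grid : List (List Int)) : List (List Int) :=
  let idx : PySem.Dict Int Int :=
    ((PySem.List.enumerate ((PySem.List.pyGet? grid 0).getD [])).filter (fun p => p.2 != 0)).foldl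
      (fun d p => d.insert p.1 p.2) PySem.Dict.empty
  let N : Int := 5 * (PySem.Dict.size idx : Int)
  (PySem.List.pyRange 0 N 1).map (fun r =>
    (PySem.List.pyRange 0 N 1).map (fun c => idx.getD (r + c - (N - 1)) 0))

-- ===== PRECONDITION & SPEC =====
-- A evaluates grid[0], which raises IndexError on the empty list; Pre_ excludes only grid = [].
def Pre_solve_feca6190 (grid : List (List Int)) : Prop := grid ≠ []
instance (grid : List (List Int)) : Decidable (Pre_solve_feca6190 grid) := by
  unfold Pre_solve_feca6190; infer_instance
def pvWitness_solve_feca6190 : List (List Int) := [[1, 0, 2, 0, 0]]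

def Spec_solve_feca6190 (grid : List (List Int)) (out : List (List Int)) : Prop :=
  out = solve_feca6190_alt grid
instance (grid : List (List Int)) (out : List (List Int)) : Decidable (Spec_solve_feca6190 grid out) := by
  unfold Spec_solve_feca6190; infer_instance

-- ===== CLAIM (what is proved, stated in full; the proofs are below) =====
def Claim_equal_solve_feca6190 : Prop := ∀ (grid : List (List Int)), Dom_solve_feca6190 grid →
  Pre_solve_feca6190 grid → Spec_solve_feca6190 grid (solve_feca6190 grid)

-- ===== LEMMAS AND PROOFS =====

-- reading position j after the in-place write xs[i] = x (for 0 ≤ i)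
lemma pv_getD_pySetD {α : Type} (o : List α) (i : Int) (x : α) (j : Nat) (d : α) (hi : 0 ≤ i) :
    (PySem.List.pySetD o i x).getD j d = if i = (j : Int) ∧ j < o.length then x else o.getD j d := by
  rw [show PySem.List.pySetD o i x = o.set i.toNat x from PySem.List.pySetD_of_nonneg o x hi]
  simp only [List.getD]
  rw [List.getElem?_set]
  by_cases h1 : i.toNat = j
  · by_cases h2 : j < o.length
    · rw [if_pos h1, if_pos (by omega), if_pos (by omega)]; rfl
    · rw [if_pos h1, if_neg (by omega), if_neg (by omega), List.getElem?_eq_none (by omega)]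
  · rw [if_neg h1, if_neg (by omega)]

-- one pvPlaceA sweep, started at row a: shape is preserved and cell (j,i) becomes val exactly
-- when the pair's position equals the cell's anti-diagonal key j+i-(N-1)
lemma pv_placeA_aux (N pos val : Int) : ∀ (n : Nat) (a : Int) (o : List (List Int)),
    (N - a).toNat = n → 0 ≤ a → (o.length : Int) = N → (∀ row ∈ o, row.length = N.toNat) →
    ((((PySem.List.pyRange a N 1).foldl (fun o r =>
        if 0 ≤ N - 1 - r + pos ∧ N - 1 - r + pos < N then
          PySem.List.pySetD o r (PySem.List.pySetD (PySem.List.pyGetD o r []) (N - 1 - r + pos) val)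
        else o) o).length : Int) = N ∧
      (∀ row ∈ (PySem.List.pyRange a N 1).foldl (fun o r =>
        if 0 ≤ N - 1 - r + pos ∧ N - 1 - r + pos < N then
          PySem.List.pySetD o r (PySem.List.pySetD (PySem.List.pyGetD o r []) (N - 1 - r + pos) val)
        else o) o, row.length = N.toNat)) ∧
    ∀ (j i : Nat), j < N.toNat → i < N.toNat →
      (((PySem.List.pyRange a N 1).foldl (fun o r =>
        if 0 ≤ N - 1 - r + pos ∧ N - 1 - r + pos < N then
          PySem.List.pySetD o r (PySem.List.pySetD (PySem.List.pyGetD o r []) (N - 1 - r + pos) val)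
        else o) o).getD j []).getD i 0 =
        if a ≤ (j : Int) ∧ (j : Int) + (i : Int) - (N - 1) = pos then val
        else (o.getD j []).getD i 0 := by
  intro n
  induction n with
  | zero =>
    intro a o hn ha h1 h2
    rw [PySem.List.pyRange_one_eq_nil (by omega)]
    simp only [List.foldl_nil]
    exact ⟨⟨h1, h2⟩, fun j i hj hi => by rw [if_neg (by omega)]⟩
  | succ n ihn =>
    intro a o hn ha h1 h2
    have hlt : a < N := by omega
    rw [PySem.List.pyRange_one_cons hlt]
    simp only [List.foldl_cons]
    have hgetA : PySem.List.pyGetD o a ([] : List Int) = o[a.toNat]'(by omega) :=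
      PySem.List.pyGetD_eq_getElem o [] ha (by omega)
    have hrowlen : (o[a.toNat]'(by omega) : List Int).length = N.toNat :=
      h2 _ (List.getElem_mem (by omega))
    by_cases hg : 0 ≤ N - 1 - a + pos ∧ N - 1 - a + pos < N
    · rw [if_pos hg]
      have hxlen : (PySem.List.pySetD (PySem.List.pyGetD o a ([] : List Int))
          (N - 1 - a + pos) val).length = N.toNat := by
        rw [PySem.List.length_pySetD, hgetA, hrowlen]
      have h1' : ((PySem.List.pySetD o a (PySem.List.pySetD (PySem.List.pyGetD o a [])
          (N - 1 - a + pos) val)).length : Int) = N := by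
        rw [PySem.List.length_pySetD]; exact h1
      have h2' : ∀ row ∈ PySem.List.pySetD o a
          (PySem.List.pySetD (PySem.List.pyGetD o a []) (N - 1 - a + pos) val),
          row.length = N.toNat := by
        intro row hr
        rw [show PySem.List.pySetD o a (PySem.List.pySetD (PySem.List.pyGetD o a [])
            (N - 1 - a + pos) val) = o.set a.toNat _ from
          PySem.List.pySetD_of_nonneg o _ ha] at hr
        rcases List.mem_or_eq_of_mem_set hr with h | h
        · exact h2 row h
        · rw [h]; exact hxlen
      have IH := ihn (a + 1) _ (by omega) (by omega) h1' h2'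
      refine ⟨IH.1, ?_⟩
      intro j i hj hi
      rw [IH.2 j i hj hi]
      rw [pv_getD_pySetD o a _ j ([] : List Int) ha]
      by_cases hja : a = (j : Int) ∧ j < o.length
      · obtain ⟨haj, hjo⟩ := hja
        subst haj
        rw [if_neg (show ¬(((j : Nat) : Int) + 1 ≤ ((j : Nat) : Int) ∧
          ((j : Nat) : Int) + (i : Int) - (N - 1) = pos) by omega)]
        rw [if_pos ⟨rfl, hjo⟩]
        have hoa : PySem.List.pyGetD o ((j : Nat) : Int) ([] : List Int) = o.getD j [] := by
          simp
        rw [hoa]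
        rw [pv_getD_pySetD (o.getD j []) (N - 1 - (j : Int) + pos) val i (0 : Int) hg.1]
        have hjlen : (o.getD j []).length = N.toNat := by
          rw [List.getD_eq_getElem o [] hjo]
          exact h2 _ (List.getElem_mem hjo)
        rw [hjlen]
        split_ifs <;> first | rfl | omega
      · rw [if_neg hja]
        split_ifs <;> first | rfl | omega
    · rw [if_neg hg]
      have IH := ihn (a + 1) o (by omega) (by omega) h1 h2
      refine ⟨IH.1, ?_⟩
      intro j i hj hi
      rw [IH.2 j i hj hi]
      split_ifs <;> first | rfl | omega

lemma pv_placeA_shape (N pos val : Int) (o : List (List Int)) (h1 : (o.length : Int) = N)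
    (h2 : ∀ row ∈ o, row.length = N.toNat) :
    ((pvPlaceA N pos val o).length : Int) = N ∧
      ∀ row ∈ pvPlaceA N pos val o, row.length = N.toNat := by
  exact (pv_placeA_aux N pos val (N - 0).toNat 0 o rfl (le_refl 0) h1 h2).1

lemma pv_placeA_cell (N pos val : Int) (o : List (List Int)) (h1 : (o.length : Int) = N)
    (h2 : ∀ row ∈ o, row.length = N.toNat) (j i : Nat) (hj : j < N.toNat) (hi : i < N.toNat) :
    ((pvPlaceA N pos val o).getD j []).getD i 0 =
      if (j : Int) + (i : Int) - (N - 1) = pos then val else (o.getD j []).getD i 0 := by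
  have h := (pv_placeA_aux N pos val (N - 0).toNat 0 o rfl (le_refl 0) h1 h2).2 j i hj hi
  refine h.trans ?_
  simp

-- A's fold over the non-zero pairs, read at cell (j,i): the LAST pair whose position is the
-- cell's anti-diagonal key wins (find? on the reversed list), else the initial cell value
lemma pv_foldA_aux (N : Int) : ∀ (L : List (Int × Int)) (o : List (List Int)),
    (o.length : Int) = N → (∀ row ∈ o, row.length = N.toNat) →
    (((L.foldl (fun o p => pvPlaceA N p.1 p.2 o) o).length : Int) = N ∧
      ∀ row ∈ L.foldl (fun o p => pvPlaceA N p.1 p.2 o) o, row.length = N.toNat) ∧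
    ∀ (j i : Nat), j < N.toNat → i < N.toNat →
      ((L.foldl (fun o p => pvPlaceA N p.1 p.2 o) o).getD j []).getD i 0 =
        match L.reverse.find? (fun p => p.1 == (j : Int) + (i : Int) - (N - 1)) with
        | some p => p.2
        | none => (o.getD j []).getD i 0 := by
  intro L
  induction L with
  | nil => intro o h1 h2; exact ⟨⟨h1, h2⟩, fun j i _ _ => rfl⟩
  | cons p L ih =>
    intro o h1 h2
    have hs := pv_placeA_shape N p.1 p.2 o h1 h2
    have ihr := ih (pvPlaceA N p.1 p.2 o) hs.1 hs.2
    refine ⟨ihr.1, ?_⟩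
    intro j i hj hi
    simp only [List.foldl_cons]
    rw [ihr.2 j i hj hi]
    rw [List.reverse_cons, List.find?_append]
    cases hfind : L.reverse.find? (fun p => p.1 == (j : Int) + (i : Int) - (N - 1)) with
    | some q => rfl
    | none =>
      rw [pv_placeA_cell N p.1 p.2 o h1 h2 j i hj hi]
      by_cases hk : p.1 = (j : Int) + (i : Int) - (N - 1)
      · rw [if_pos hk.symm, List.find?_cons_of_pos (by simp [hk])]
        rfl
      · rw [if_neg (fun h => hk h.symm), List.find?_cons_of_neg (by simp [hk])]
        rfl

-- B's dict fold, looked up at key k: the LAST inserted pair with key k wins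
lemma pv_get?_foldl_insert : ∀ (L : List (Int × Int)) (d : PySem.Dict Int Int) (k : Int),
    (L.foldl (fun d p => d.insert p.1 p.2) d).get? k =
      match L.reverse.find? (fun p => p.1 == k) with
      | some p => some p.2
      | none => d.get? k := by
  intro L
  induction L with
  | nil => intro d k; rfl
  | cons p L ih =>
    intro d k
    simp only [List.foldl_cons]
    rw [ih, List.reverse_cons, List.find?_append]
    cases hfind : L.reverse.find? (fun p => p.1 == k) with
    | some q => rfl
    | none =>
      rw [PySem.Dict.get?_insert]
      by_cases hk : p.1 = k
      · rw [if_pos hk.symm, List.find?_cons_of_pos (by simp [hk])]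
        rfl
      · rw [if_neg (fun h => hk h.symm), List.find?_cons_of_neg (by simp [hk])]
        rfl

-- the non-zero pairs carry strictly increasing (hence distinct) keys,
-- so the dict comprehension has exactly one item per pair
lemma pv_size_idx (vals : List Int) :
    ((PySem.Dict.size (((PySem.List.enumerate vals).filter (fun p => p.2 != 0)).foldl
      (fun d p => d.insert p.1 p.2) PySem.Dict.empty) : Int)) =
      PySem.List.len ((PySem.List.enumerate vals).filter (fun p => p.2 != 0)) := by
  have hpw : ((PySem.List.enumerate vals).filter (fun p => p.2 != 0)).Pairwise
      (fun p q => p.1 < q.1) :=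
    List.Pairwise.filter _ (PySem.List.pairwise_lt_enumerate vals 0)
  have hnd : (((PySem.List.enumerate vals).filter (fun p => p.2 != 0)).map (fun p => p.1)).Nodup :=
    List.pairwise_map.mpr (hpw.imp (fun h => Int.ne_of_lt h))
  have hitems : ((((PySem.List.enumerate vals).filter (fun p => p.2 != 0)).foldl
      (fun d p => d.insert p.1 p.2) (PySem.Dict.empty : PySem.Dict Int Int)).items)
      = PySem.Dict.empty.items
        ++ ((PySem.List.enumerate vals).filter (fun p => p.2 != 0)).map (fun a => (a.1, a.2)) :=
    PySem.Dict.items_foldl_insert_fresh _ (fun p : Int × Int => p.1) (fun p : Int × Int => p.2) PySem.Dict.empty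
      (by simp) hnd
  simp [PySem.Dict.size, hitems, PySem.List.len_eq]

-- ===== VERDICT (by name: the statement is the Claim_ definition above) =====
theorem solve_feca6190_spec : Claim_equal_solve_feca6190 := by
  intro grid _ _
  unfold Spec_solve_feca6190
  simp only [solve_feca6190, solve_feca6190_alt]
  rw [pv_size_idx ((PySem.List.pyGet? grid 0).getD [])]
  set L := (PySem.List.enumerate ((PySem.List.pyGet? grid 0).getD [])).filter
    (fun p => p.2 != 0) with hLdef
  set N := 5 * PySem.List.len L with hNdef
  have hN0 : 0 ≤ N := by
    rw [hNdef, PySem.List.len_eq]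
    have := Int.natCast_nonneg L.length
    omega
  have h1 : ((List.replicate N.toNat (List.replicate N.toNat (0 : Int))).length : Int) = N := by
    simp only [List.length_replicate]; omega
  have h2 : ∀ row ∈ List.replicate N.toNat (List.replicate N.toNat (0 : Int)),
      row.length = N.toNat := by
    intro row hr
    rw [List.eq_of_mem_replicate hr, List.length_replicate]
  have hA := pv_foldA_aux N L _ h1 h2
  have hAlen : (L.foldl (fun o p => pvPlaceA N p.1 p.2 o)
      (List.replicate N.toNat (List.replicate N.toNat (0 : Int)))).length = N.toNat := by
    have := hA.1.1; omega
  apply List.ext_getElem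
  · rw [hAlen]
    simp only [List.length_map, PySem.List.length_pyRange_one]
    omega
  · intro j hj1 hj2
    have hjN : j < N.toNat := by rw [hAlen] at hj1; exact hj1
    have hrowA : (L.foldl (fun o p => pvPlaceA N p.1 p.2 o)
        (List.replicate N.toNat (List.replicate N.toNat (0 : Int))))[j].length = N.toNat :=
      hA.1.2 _ (List.getElem_mem hj1)
    rw [List.getElem_map, PySem.List.getElem_pyRange_one]
    apply List.ext_getElem
    · rw [hrowA]
      simp only [List.length_map, PySem.List.length_pyRange_one]
      omega
    · intro i hi1 hi2
      have hiN : i < N.toNat := by rw [hrowA] at hi1; exact hi1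
      rw [List.getElem_map, PySem.List.getElem_pyRange_one]
      have hz : ((List.replicate N.toNat (List.replicate N.toNat (0 : Int))).getD j []).getD i 0
          = (0 : Int) := by
        rw [List.getD_eq_getElem (List.replicate N.toNat (List.replicate N.toNat (0 : Int)))
            [] (show j < _ by simpa using hjN), List.getElem_replicate,
          List.getD_eq_getElem (List.replicate N.toNat (0 : Int)) 0
            (show i < _ by simpa using hiN), List.getElem_replicate]
      have hcell := hA.2 j i hjN hiN
      rw [hz] at hcell
      rw [List.getD_eq_getElem _ _ hj1, List.getD_eq_getElem _ _ hi1] at hcell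
      rw [hcell]
      rw [PySem.Dict.getD_eq_get?_getD, pv_get?_foldl_insert L PySem.Dict.empty _,
        PySem.Dict.get?_empty]
      simp only [zero_add]
      cases L.reverse.find? (fun p => p.1 == (j : Int) + (i : Int) - (N - 1)) <;> rfl
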